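-- pv_equiv track=rewrite | github.com/secuditor/secuditor-scripts | sp_security_events.py | format_security_events
-- ===== SOURCE A (Python) =====
-- def format_security_events(data):
--     """
--     Formats the security events dictionary into a clean, readable string
--     with separators.
--     """
--     lines = [""]
--     lines.append("–" * 40)
--     lines.append("Last 24 Hours:")
--     lines.append("–" * 40)
--
--     events = data.get("Last 24 Hours", [])
--     if isinstance(events, str):
--         lines.append(f"    {events}")
--     elif events:
--         for i, e in enumerate(events):
--             lines.append(f"    Event ID: {e['Event ID']}")
--             lines.append(f"    Description: {e['Description']}")
--             lines.append("    Log Snippet:")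
--             snippet = e.get("Log Snippet", "")
--             for line in snippet.splitlines():
--                 lines.append(f"        {line}")
--             # Only add separator if not the last event
--             if i != len(events) - 1:
--                 lines.append("–" * 40)
--     else:
--         lines.append("    None Detected")
--
--     return "\n".join(lines)
-- ===== SOURCE B (Python) =====
-- def format_security_events(data):
--     """
--     Formats the security events dictionary into a clean, readable string
--     with separators.
--     """
--     sep = "–" * 40
--     header = "\n" + sep + "\nLast 24 Hours:\n" + sep
--     events = data.get("Last 24 Hours", [])
--     if isinstance(events, str):
--         return header + "\n    " + events
--     if not events:
--         return header + "\n    None Detected"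
--
--     def block(e):
--         s = "\n    Event ID: " + str(e['Event ID'])
--         s += "\n    Description: " + str(e['Description'])
--         s += "\n    Log Snippet:"
--         for ln in e.get("Log Snippet", "").splitlines():
--             s += "\n        " + ln
--         return s
--
--     def rest(evs):
--         # separator BEFORE each subsequent event; recursion over the tail
--         if not evs:
--             return ""
--         return "\n" + sep + block(evs[0]) + rest(evs[1:])
--
--     return header + block(events[0]) + rest(events[1:])
-- ===== Notes on version B (the rewrite author's own statement) =====
-- stated objective: alternative
-- what changed: B replaces A's flat line-list with enumerate, last-index check and a final join by a recursive separator-BEFORE decomposition that concatenates strings directly: one block string per event built by appending, and a recursion over the tail that prepends the separator to every subsequent event; no list of lines and no join.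
import Mathlib
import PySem

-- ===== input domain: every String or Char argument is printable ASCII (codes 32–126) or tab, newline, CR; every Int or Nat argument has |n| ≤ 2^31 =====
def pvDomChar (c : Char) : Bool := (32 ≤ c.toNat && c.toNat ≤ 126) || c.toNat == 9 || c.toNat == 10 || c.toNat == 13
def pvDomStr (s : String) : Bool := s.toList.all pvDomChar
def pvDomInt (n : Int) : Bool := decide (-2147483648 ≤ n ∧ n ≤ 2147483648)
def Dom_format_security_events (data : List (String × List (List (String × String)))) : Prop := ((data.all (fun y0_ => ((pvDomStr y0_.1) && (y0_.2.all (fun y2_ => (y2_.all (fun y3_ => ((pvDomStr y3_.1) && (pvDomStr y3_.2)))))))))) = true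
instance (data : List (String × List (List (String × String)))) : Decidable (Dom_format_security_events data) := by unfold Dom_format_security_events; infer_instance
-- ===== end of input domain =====

-- B replaces A's flat line list (enumerate + last-index check + final join) by a
-- recursive separator-BEFORE decomposition that concatenates strings directly: one
-- block string per event, and a recursion over the tail prepending the separator to
-- every subsequent event; same output, alternative decomposition.
-- (Under the type convention the dict values are lists, so A's `isinstance(events, str)`
-- branch is unreachable and is not ported.)

-- "–" * 40
def pvSep : String := "––––––––––––––––––––––––––––––––––––––––"

-- ===== PORT A =====
-- lines appended for one event:  Event ID, Description, "Log Snippet:" and the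
-- indented snippet lines.  e['Event ID'] / e['Description'] raise KeyError when the
-- key is absent; Pre_ excludes those inputs, so getD "" is exact there.
def pvALines (e : List (String × String)) : List String :=
  ["    Event ID: " ++ (PySem.Dict.mk e).getD "Event ID" "",
   "    Description: " ++ (PySem.Dict.mk e).getD "Description" "",
   "    Log Snippet:"]
  ++ (PySem.Str.splitlines ((PySem.Dict.mk e).getD "Log Snippet" "")).map (fun l => "        " ++ l)

def format_security_events (data : List (String × List (List (String × String)))) : String :=
  let lines : List String := ["", pvSep, "Last 24 Hours:", pvSep]
  let events := (PySem.Dict.mk data).getD "Last 24 Hours" []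
  let lines :=
    if events ≠ [] then
      (PySem.List.enumerate events).foldl
        (fun acc p =>
          acc ++ pvALines p.2 ++
            (if p.1 ≠ (events.length : Int) - 1 then [pvSep] else []))
        lines
    else lines ++ ["    None Detected"]
  PySem.Str.join "\n" lines

-- ===== PORT B =====
-- B's `block(e)`: string built by successive appends (the snippet loop is a fold
-- appending "\n        " + line)
def pvBBlock (e : List (String × String)) : String :=
  let s := "\n    Event ID: " ++ (PySem.Dict.mk e).getD "Event ID" ""
  let s := s ++ ("\n    Description: " ++ (PySem.Dict.mk e).getD "Description" "")
  let s := s ++ "\n    Log Snippet:"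
  (PySem.Str.splitlines ((PySem.Dict.mk e).getD "Log Snippet" "")).foldl
    (fun s ln => s ++ ("\n        " ++ ln)) s

-- B's `rest(evs)`: separator before each subsequent event, recursion over the tail
def pvBRest : List (List (String × String)) → String
  | [] => ""
  | e :: es => "\n" ++ pvSep ++ pvBBlock e ++ pvBRest es

def format_security_events_alt (data : List (String × List (List (String × String)))) : String :=
  let header := "\n" ++ pvSep ++ "\nLast 24 Hours:\n" ++ pvSep
  match (PySem.Dict.mk data).getD "Last 24 Hours" [] with
  | [] => header ++ "\n    None Detected"
  | e :: es => header ++ pvBBlock e ++ pvBRest es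

-- ===== PRECONDITION & SPEC =====
-- A raises KeyError on e['Event ID'] / e['Description'] when an event dict lacks one of
-- those keys; Pre_ excludes exactly those inputs (everything else is accepted).
def Pre_format_security_events (data : List (String × List (List (String × String)))) : Prop :=
  (((PySem.Dict.mk data).getD "Last 24 Hours" []).all
    (fun e => (PySem.Dict.mk e).contains "Event ID" && (PySem.Dict.mk e).contains "Description")) = true
instance (data : List (String × List (List (String × String)))) : Decidable (Pre_format_security_events data) := by unfold Pre_format_security_events; infer_instance

def pvWitness_format_security_events : (List (String × List (List (String × String)))) :=
  [("Last 24 Hours", [[("Event ID", "4625"), ("Description", "failed logon"), ("Log Snippet", "a\nb")],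
                      [("Event ID", "4624"), ("Description", "logon")]])]

def Spec_format_security_events (data : List (String × List (List (String × String)))) (out : String) : Prop := out = format_security_events_alt data
instance (data : List (String × List (List (String × String)))) (out : String) : Decidable (Spec_format_security_events data out) := by unfold Spec_format_security_events; infer_instance

-- ===== CLAIM (what is proved, stated in full; the proofs are below) =====
def Claim_equal_format_security_events : Prop := ∀ (data : List (String × List (List (String × String)))), Dom_format_security_events data → Pre_format_security_events data → Spec_format_security_events data (format_security_events data)

-- ===== LEMMAS AND PROOFS =====

theorem pv_str_ext {s t : String} (h : s.toList = t.toList) : s = t := by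
  have := congrArg String.ofList h
  simpa using this

theorem pv_chars_join_append (d : List Char) (as bs : List (List Char))
    (ha : as ≠ []) (hb : bs ≠ []) :
    PySem.Chars.join d (as ++ bs) = PySem.Chars.join d as ++ d ++ PySem.Chars.join d bs := by
  induction as with
  | nil => exact absurd rfl ha
  | cons x as ih =>
    cases as with
    | nil =>
      cases bs with
      | nil => exact absurd rfl hb
      | cons b bs' =>
        rw [show [x] ++ (b :: bs') = x :: b :: bs' from rfl, PySem.Chars.join_cons_cons,
          PySem.Chars.join_singleton]
    | cons y as' =>
      have h1 : PySem.Chars.join d ((x :: y :: as') ++ bs)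
          = x ++ d ++ PySem.Chars.join d ((y :: as') ++ bs) := by
        cases bs <;> simp [PySem.Chars.join_cons_cons]
      rw [h1, ih (by simp), PySem.Chars.join_cons_cons]
      simp [List.append_assoc]

theorem pv_str_join_append (d : String) (as bs : List String)
    (ha : as ≠ []) (hb : bs ≠ []) :
    PySem.Str.join d (as ++ bs) = PySem.Str.join d as ++ d ++ PySem.Str.join d bs := by
  apply pv_str_ext
  rw [PySem.Str.toList_join, List.map_append,
    pv_chars_join_append d.toList (as.map String.toList) (bs.map String.toList)
      (by simpa using ha) (by simpa using hb)]
  simp [PySem.Str.toList_join, List.append_assoc]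

theorem pv_str_join_singleton (d x : String) : PySem.Str.join d [x] = x := by
  apply pv_str_ext
  rw [PySem.Str.toList_join]
  simp [PySem.Chars.join_singleton]

theorem pv_str_join_cons_cons (d x y : String) (rest : List String) :
    PySem.Str.join d (x :: y :: rest) = x ++ d ++ PySem.Str.join d (y :: rest) := by
  apply pv_str_ext
  simp [PySem.Str.toList_join, PySem.Chars.join_cons_cons]

-- the fold body of port A, in flatMap form
def pvG (N : Int) (p : Int × List (String × String)) : List String :=
  pvALines p.2 ++ (if p.1 ≠ N - 1 then [pvSep] else [])

theorem pvALines_ne (e : List (String × String)) : pvALines e ≠ [] := by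
  simp [pvALines]

theorem pv_body_ne (N : Int) (es : List (List (String × String))) (s : Int) (h : es ≠ []) :
    (PySem.List.enumerate es s).flatMap (pvG N) ≠ [] := by
  cases es with
  | nil => exact absurd rfl h
  | cons e es' =>
    simp only [PySem.List.enumerate_cons, List.flatMap_cons]
    intro hcontra
    rcases List.append_eq_nil_iff.mp hcontra with ⟨h1, _⟩
    rcases List.append_eq_nil_iff.mp h1 with ⟨h2, _⟩
    exact pvALines_ne e h2

-- the snippet-loop fold of B's block appends the concatenation of "\n        " + line
def pvTailCat : List String → String
  | [] => ""
  | l :: ls => "\n        " ++ l ++ pvTailCat ls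

theorem pv_fold_tailcat (ls : List String) (s : String) :
    ls.foldl (fun s ln => s ++ ("\n        " ++ ln)) s = s ++ pvTailCat ls := by
  induction ls generalizing s with
  | nil => simp [pvTailCat]
  | cons l ls ih =>
    rw [List.foldl_cons, ih]
    apply pv_str_ext
    simp [pvTailCat]

theorem pv_join_indent (x : String) (ls : List String) :
    PySem.Str.join "\n" (x :: ls.map (fun l => "        " ++ l)) = x ++ pvTailCat ls := by
  induction ls generalizing x with
  | nil => simp [pvTailCat, pv_str_join_singleton]
  | cons l ls ih =>
    rw [List.map_cons, pv_str_join_cons_cons, ih]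
    apply pv_str_ext
    simp [pvTailCat]

-- B's block is "\n" followed by A's event lines joined with "\n"
theorem pvBBlock_eq (e : List (String × String)) :
    pvBBlock e = "\n" ++ PySem.Str.join "\n" (pvALines e) := by
  unfold pvBBlock pvALines
  rw [pv_fold_tailcat]
  rw [show (["    Event ID: " ++ (PySem.Dict.mk e).getD "Event ID" "",
      "    Description: " ++ (PySem.Dict.mk e).getD "Description" "",
      "    Log Snippet:"]
      ++ (PySem.Str.splitlines ((PySem.Dict.mk e).getD "Log Snippet" "")).map
          (fun l => "        " ++ l))
    = ("    Event ID: " ++ (PySem.Dict.mk e).getD "Event ID" "") ::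
      ("    Description: " ++ (PySem.Dict.mk e).getD "Description" "") ::
      (("    Log Snippet:") ::
        (PySem.Str.splitlines ((PySem.Dict.mk e).getD "Log Snippet" "")).map
          (fun l => "        " ++ l)) from rfl]
  rw [pv_str_join_cons_cons, pv_str_join_cons_cons, pv_join_indent]
  apply pv_str_ext
  simp

-- the key induction: A's flat line list joined with "\n" equals B's head block
-- (without its leading "\n") followed by the separator-before recursion
theorem pv_main (N : Int) (e : List (String × String)) (es : List (List (String × String)))
    (s : Int) (hs : s + (e :: es).length = N) :
    PySem.Str.join "\n" ((PySem.List.enumerate (e :: es) s).flatMap (pvG N))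
      = PySem.Str.join "\n" (pvALines e) ++ pvBRest es := by
  induction es generalizing e s with
  | nil =>
    have hs' : s = N - 1 := by simp at hs; omega
    rw [PySem.List.enumerate_cons, PySem.List.enumerate_nil, List.flatMap_cons,
      List.flatMap_nil, List.append_nil, hs']
    have hg : pvG N (N - 1, e) = pvALines e := by simp [pvG]
    rw [hg, pvBRest]
    apply pv_str_ext
    simp
  | cons f es' ih =>
    have hne : s ≠ N - 1 := by simp at hs; omega
    have hstep : (PySem.List.enumerate (e :: f :: es') s).flatMap (pvG N)
        = (pvALines e ++ [pvSep]) ++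
            (PySem.List.enumerate (f :: es') (s + 1)).flatMap (pvG N) := by
      rw [PySem.List.enumerate_cons, List.flatMap_cons]
      simp [pvG, if_pos hne, List.append_assoc]
    rw [hstep,
      pv_str_join_append "\n" _ _ (by simp [pvALines])
        (pv_body_ne N (f :: es') (s + 1) (by simp)),
      pv_str_join_append "\n" (pvALines e) [pvSep] (pvALines_ne e) (by simp),
      pv_str_join_singleton, ih f (s + 1) (by simp at hs ⊢; omega)]
    rw [pvBRest, pvBBlock_eq]
    apply pv_str_ext
    simp

set_option maxRecDepth 40000 in
theorem pv_header :
    PySem.Str.join "\n" ["", pvSep, "Last 24 Hours:", pvSep]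
      = "\n" ++ pvSep ++ "\nLast 24 Hours:\n" ++ pvSep := by decide

set_option maxRecDepth 40000 in
theorem pv_empty :
    PySem.Str.join "\n" (["", pvSep, "Last 24 Hours:", pvSep] ++ ["    None Detected"])
      = ("\n" ++ pvSep ++ "\nLast 24 Hours:\n" ++ pvSep) ++ "\n    None Detected" := by decide

-- ===== VERDICT (by name: the statement is the Claim_ definition above) =====
theorem format_security_events_spec : Claim_equal_format_security_events := by
  intro data _ _
  unfold Spec_format_security_events format_security_events format_security_events_alt
  set events := (PySem.Dict.mk data).getD "Last 24 Hours" [] with hev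
  cases hcase : events with
  | nil =>
    simp only [ne_eq, not_true_eq_false, if_false]
    exact pv_empty
  | cons e es =>
    simp only [ne_eq, reduceCtorEq, not_false_eq_true, if_true]
    have hfold :
        List.foldl (fun acc p => acc ++ pvALines p.2 ++
            if ¬p.1 = ((e :: es).length : Int) - 1 then [pvSep] else [])
          ["", pvSep, "Last 24 Hours:", pvSep] (PySem.List.enumerate (e :: es))
        = List.foldl (fun acc p => acc ++ pvG ((e :: es).length : Int) p)
          ["", pvSep, "Last 24 Hours:", pvSep] (PySem.List.enumerate (e :: es)) := by
      apply PySem.List.foldl_congr_mem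
      intro acc x _
      simp [pvG, List.append_assoc]
    rw [hfold, PySem.List.foldl_append_eq_flatMap (g := pvG ((e :: es).length : Int))
          (l := PySem.List.enumerate (e :: es)) (acc := ["", pvSep, "Last 24 Hours:", pvSep])]
    rw [pv_str_join_append "\n" ["", pvSep, "Last 24 Hours:", pvSep] _
          (by simp) (pv_body_ne _ (e :: es) 0 (by simp))]
    rw [pv_header, pv_main ((e :: es).length : Int) e es 0 (by simp), pvBBlock_eq]
    apply pv_str_ext
    simp
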